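-- pv_equiv track=rewrite | github.com/gregoryann/Python-Beginner-Examples | +1500 Python Challenges/Medium/Mini Sudoku.py | is_mini_sudoku
-- ===== SOURCE A (Python) =====
-- def is_mini_sudoku(square):
-- 	new_list = []
-- 	numbers=[1,2,3,4,5,6,7,8,9]
-- 	for x in square:
-- 		for y in x:
-- 			new_list.append(y)
-- 	new_list.sort()
-- 	if new_list == numbers:
-- 		return True
-- 	else: return False
-- ===== SOURCE B (Python) =====
-- def is_mini_sudoku(square):
--     seen = set()
--     for row in square:
--         for y in row:
--             if y in seen or not (1 <= y <= 9):
--                 return False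
--             seen.add(y)
--     return len(seen) == 9
-- ===== Notes on version B (the rewrite author's own statement) =====
-- stated objective: faster
-- what changed: Replaces flatten-then-sort-then-compare with a single pass over the grid that keeps a seen-set, exits early on a duplicate or out-of-range value, and checks the set size at the end.
import Mathlib
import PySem

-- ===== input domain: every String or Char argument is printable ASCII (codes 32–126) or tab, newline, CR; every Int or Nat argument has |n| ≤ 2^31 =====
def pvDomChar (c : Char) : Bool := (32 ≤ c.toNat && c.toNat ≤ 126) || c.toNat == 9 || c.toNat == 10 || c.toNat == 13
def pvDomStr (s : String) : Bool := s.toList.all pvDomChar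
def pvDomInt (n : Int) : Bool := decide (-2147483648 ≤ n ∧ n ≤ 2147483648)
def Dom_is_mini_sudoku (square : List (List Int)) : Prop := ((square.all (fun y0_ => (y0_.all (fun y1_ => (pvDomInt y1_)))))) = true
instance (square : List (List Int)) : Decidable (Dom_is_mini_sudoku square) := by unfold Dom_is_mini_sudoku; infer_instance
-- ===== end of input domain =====

-- B replaces flatten+sort+compare with a single pass keeping a seen-set and an early exit; objective: alternative (same result, different algorithm).

-- ===== PORT A =====
def is_mini_sudoku (square : List (List Int)) : Bool :=
  let new_list : List Int := square.foldl (fun acc x => x.foldl (fun acc y => acc ++ [y]) acc) []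
  let numbers : List Int := [1,2,3,4,5,6,7,8,9]
  let new_list := PySem.List.sorted new_list (fun v => v) false
  if new_list == numbers then true else false

-- ===== PORT B =====
-- inner loop of B: over one row, early return none = Python 'return False'
def pvAltRow (seen : PySem.Set Int) : List Int → Option (PySem.Set Int)
  | [] => some seen
  | y :: ys =>
    if PySem.Set.contains seen y || !(decide (1 ≤ y) && decide (y ≤ 9)) then none
    else pvAltRow (PySem.Set.add seen y) ys

-- outer loop of B over the rows
def pvAltRows (seen : PySem.Set Int) : List (List Int) → Option (PySem.Set Int)
  | [] => some seen
  | r :: rs =>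
    match pvAltRow seen r with
    | none => none
    | some s => pvAltRows s rs

def is_mini_sudoku_alt (square : List (List Int)) : Bool :=
  match pvAltRows PySem.Set.empty square with
  | none => false
  | some seen => PySem.Set.len seen == 9

-- ===== PRECONDITION & SPEC =====
def Spec_is_mini_sudoku (square : List (List Int)) (out : Bool) : Prop := out = is_mini_sudoku_alt square
instance (square : List (List Int)) (out : Bool) : Decidable (Spec_is_mini_sudoku square out) := by unfold Spec_is_mini_sudoku; infer_instance

-- ===== CLAIM (what is proved, stated in full; the proofs are below) =====
def Claim_equal_is_mini_sudoku : Prop := ∀ (square : List (List Int)), Dom_is_mini_sudoku square → Spec_is_mini_sudoku square (is_mini_sudoku square)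

-- ===== LEMMAS AND PROOFS =====

-- A's nested append loops build the flattening of the grid
theorem pv_flat_inner (x : List Int) (acc : List Int) :
    x.foldl (fun acc y => acc ++ [y]) acc = acc ++ x := by
  induction x generalizing acc with
  | nil => simp
  | cons y ys ih => simp [List.foldl, ih]

theorem pv_flat (square : List (List Int)) (acc : List Int) :
    square.foldl (fun acc x => x.foldl (fun acc y => acc ++ [y]) acc) acc = acc ++ square.flatten := by
  induction square generalizing acc with
  | nil => simp
  | cons r rs ih => rw [List.foldl_cons, pv_flat_inner, ih, List.flatten_cons, List.append_assoc]

-- success characterisation of B's inner loop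
theorem pv_row_some (ys : List Int) (seen : PySem.Set Int) (h : seen.Nodup) :
    (∀ s, pvAltRow seen ys = some s →
      s = seen ++ ys ∧ (seen ++ ys).Nodup ∧ ∀ y ∈ ys, 1 ≤ y ∧ y ≤ 9) ∧
    ((seen ++ ys).Nodup → (∀ y ∈ ys, 1 ≤ y ∧ y ≤ 9) → pvAltRow seen ys = some (seen ++ ys)) := by
  induction ys generalizing seen with
  | nil => simp [pvAltRow, h]
  | cons y ys ih =>
    constructor
    · intro s hs
      simp only [pvAltRow] at hs
      split at hs
      · exact absurd hs (by simp)
      · rename_i hc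
        simp only [Bool.or_eq_true, Bool.not_eq_true', Bool.and_eq_false_iff,
          PySem.Set.contains, List.contains_eq_mem,
          decide_eq_true_eq, decide_eq_false_iff_not, not_or] at hc
        push_neg at hc
        obtain ⟨hy, h1, h9⟩ := hc
        have hadd : PySem.Set.add seen y = seen ++ [y] := by
          simp [PySem.Set.add, PySem.Set.contains, List.contains_eq_mem, hy]
        have hn2 : (seen ++ [y]).Nodup := by
          refine List.Nodup.append h (by simp) ?_
          intro a ha hb
          simp only [List.mem_singleton] at hb
          subst hb; exact hy ha
        have := (ih (seen ++ [y]) hn2).1 s (by rwa [hadd] at hs)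
        obtain ⟨he, hnd, hr⟩ := this
        refine ⟨by simpa using he, by simpa using hnd, ?_⟩
        intro z hz
        rcases List.mem_cons.mp hz with hz | hz
        · subst hz; exact ⟨h1, h9⟩
        · exact hr z hz
    · intro hnd hr
      have hy : y ∉ seen := by
        intro hy
        exact List.disjoint_of_nodup_append hnd hy (by simp)
      have h19 := hr y (by simp)
      rw [List.append_cons] at hnd
      simp only [pvAltRow]
      rw [if_neg]
      · have hadd : PySem.Set.add seen y = seen ++ [y] := by
          simp [PySem.Set.add, PySem.Set.contains, List.contains_eq_mem, hy]
        rw [hadd]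
        have := (ih (seen ++ [y]) hnd.of_append_left).2 hnd
          (fun z hz => hr z (by simp [hz]))
        rw [this]
        simp
      · simp [PySem.Set.contains, List.contains_eq_mem, hy, h19.1, h19.2]

-- success characterisation of B's outer loop: seen accumulates the flattening
theorem pv_rows_some (rows : List (List Int)) (seen : PySem.Set Int) (h : seen.Nodup) :
    (∀ s, pvAltRows seen rows = some s →
      s = seen ++ rows.flatten ∧ (seen ++ rows.flatten).Nodup ∧ ∀ y ∈ rows.flatten, 1 ≤ y ∧ y ≤ 9) ∧
    ((seen ++ rows.flatten).Nodup → (∀ y ∈ rows.flatten, 1 ≤ y ∧ y ≤ 9) →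
      pvAltRows seen rows = some (seen ++ rows.flatten)) := by
  induction rows generalizing seen with
  | nil => simp [pvAltRows, h]
  | cons r rs ih =>
    constructor
    · intro s hs
      simp only [pvAltRows] at hs
      rcases hrow : pvAltRow seen r with _ | s1
      · rw [hrow] at hs; exact absurd hs (by simp)
      · rw [hrow] at hs
        obtain ⟨he1, hn1, hr1⟩ := (pv_row_some r seen h).1 s1 hrow
        subst he1
        obtain ⟨he2, hn2, hr2⟩ := (ih (seen ++ r) hn1).1 s hs
        refine ⟨by simpa using he2, by simpa using hn2, ?_⟩
        intro z hz
        simp only [List.flatten_cons, List.mem_append] at hz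
        rcases hz with hz | hz
        · exact hr1 z hz
        · exact hr2 z hz
    · intro hnd hr
      simp only [List.flatten_cons] at hnd hr
      have hn1 : (seen ++ r).Nodup := by
        simp [List.nodup_append] at hnd ⊢
        tauto
      have hrow := (pv_row_some r seen h).2 hn1 (fun z hz => hr z (by simp [hz]))
      simp only [pvAltRows, hrow]
      have := (ih (seen ++ r) hn1).2 (by simpa using hnd) (fun z hz => hr z (by simp [hz]))
      rw [this]
      simp

-- B returns true exactly when the flattening is a duplicate-free list of 9 digits 1..9
theorem pv_alt_iff (square : List (List Int)) :
    is_mini_sudoku_alt square = true ↔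
      square.flatten.Nodup ∧ (∀ y ∈ square.flatten, 1 ≤ y ∧ y ≤ 9) ∧ square.flatten.length = 9 := by
  unfold is_mini_sudoku_alt
  rcases hrows : pvAltRows PySem.Set.empty square with _ | seen
  · simp only [Bool.false_eq_true, false_iff]
    rintro ⟨hnd, hr, _⟩
    have h0 : ((PySem.Set.empty : PySem.Set Int) ++ square.flatten).Nodup := by
      simpa [PySem.Set.empty] using hnd
    have := (pv_rows_some square PySem.Set.empty (by simp [PySem.Set.empty])).2 h0 hr
    rw [hrows] at this
    exact absurd this (by simp)
  · obtain ⟨he, hnd, hr⟩ := (pv_rows_some square PySem.Set.empty (by simp [PySem.Set.empty])).1 seen hrows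
    simp only [PySem.Set.empty, List.nil_append] at he hnd
    subst he
    simp only [PySem.Set.len, beq_iff_eq]
    constructor
    · intro hl
      exact ⟨hnd, hr, by exact_mod_cast hl⟩
    · rintro ⟨_, _, hl⟩
      exact_mod_cast hl

-- the flattening is a permutation of [1..9] iff it is nodup, in range 1..9, of length 9
theorem pv_perm_iff (l : List Int) :
    l.Perm [1,2,3,4,5,6,7,8,9] ↔ (l.Nodup ∧ (∀ y ∈ l, 1 ≤ y ∧ y ≤ 9) ∧ l.length = 9) := by
  constructor
  · intro hp
    refine ⟨hp.nodup_iff.mpr (by decide), ?_, by simpa using hp.length_eq⟩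
    intro y hy
    have := (hp.mem_iff).mp hy
    fin_cases this <;> simp
  · rintro ⟨hnd, hr, hl⟩
    have hsub : l ⊆ [1,2,3,4,5,6,7,8,9] := by
      intro y hy
      have ⟨h1, h9⟩ := hr y hy
      simp only [List.mem_cons]
      omega
    have hsp : l.Subperm [1,2,3,4,5,6,7,8,9] := hnd.subperm hsub
    exact hsp.perm_of_length_le (by simp [hl])

-- A returns true exactly when the flattening is a permutation of [1..9]
theorem pv_a_iff (square : List (List Int)) :
    is_mini_sudoku square = true ↔ square.flatten.Perm [1,2,3,4,5,6,7,8,9] := by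
  unfold is_mini_sudoku
  simp only [pv_flat, List.nil_append]
  split_ifs with hc
  · simp only [true_iff]
    have hs : PySem.List.sorted square.flatten (fun v => v) false = [1,2,3,4,5,6,7,8,9] := by
      simpa using hc
    exact hs ▸ (PySem.List.sorted_perm square.flatten (fun v => v) false).symm
  · simp only [Bool.false_eq_true, false_iff]
    intro hp
    have hs : PySem.List.sorted square.flatten (fun v => v) false = [1,2,3,4,5,6,7,8,9] :=
      PySem.List.sorted_id_eq_of_perm_of_pairwise _ _ hp.symm (by decide)
    exact hc (by simp [hs])

-- ===== VERDICT (by name: the statement is the Claim_ definition above) =====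
theorem is_mini_sudoku_spec : Claim_equal_is_mini_sudoku := by
  intro square _
  unfold Spec_is_mini_sudoku
  rcases hb : is_mini_sudoku_alt square with _ | _
  · rcases ha : is_mini_sudoku square with _ | _
    · rfl
    · exfalso
      have := (pv_a_iff square).mp ha
      have := (pv_alt_iff square).mpr ((pv_perm_iff _).mp this)
      rw [hb] at this; exact absurd this (by simp)
  · exact (pv_a_iff square).mpr ((pv_perm_iff _).mpr ((pv_alt_iff square).mp hb))
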